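-- pv_equiv track=rewrite | github.com/mli14/Monday | clio.py | samecolumn
-- ===== SOURCE A (Python) =====
-- def samecolumn(g,i):
--     j=0
--     d=[]
--     result=[]
--     while j<len(g):
--         d.append(g[j][i])
--         j+=1
--     j=0
--     while j<len(d):
--         result.append([g[j][i]==m for m in d])
--         j+=1
--     return(result)
-- ===== SOURCE B (Python) =====
-- def samecolumn(g, i):
--     # Extract the column once, then memoize each distinct value's comparison row
--     # in a dict so duplicates reuse one computed row instead of recomputing it.
--     d = [row[i] for row in g]
--     cache = {}
--     for v in d:
--         if v not in cache:
--             cache[v] = [v == m for m in d]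
--     return [cache[v] for v in d]
-- ===== Notes on version B (the rewrite author's own statement) =====
-- stated objective: faster
-- what changed: B extracts the column once and memoizes one comparison row per distinct value in a dict, so duplicate values reuse a computed row instead of recomputing the full n-wide comparison, and B never re-indexes g in the output pass.
import Mathlib
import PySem

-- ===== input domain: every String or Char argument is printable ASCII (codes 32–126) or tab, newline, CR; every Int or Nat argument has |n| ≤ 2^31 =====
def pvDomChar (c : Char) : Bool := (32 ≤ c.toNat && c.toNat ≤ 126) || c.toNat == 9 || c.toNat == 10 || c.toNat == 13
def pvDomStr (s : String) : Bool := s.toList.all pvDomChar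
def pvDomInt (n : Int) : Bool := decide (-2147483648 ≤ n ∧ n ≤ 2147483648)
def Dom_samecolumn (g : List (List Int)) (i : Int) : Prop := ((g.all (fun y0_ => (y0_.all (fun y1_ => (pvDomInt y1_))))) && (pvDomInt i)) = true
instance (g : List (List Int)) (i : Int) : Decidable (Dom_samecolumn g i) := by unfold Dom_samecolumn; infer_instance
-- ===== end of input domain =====

-- B memoizes one comparison row per distinct column value in a dict; same return value as A
-- on every input where A returns (A raises IndexError when i is out of range for some row).

-- ===== PORT A =====
def samecolumn (g : List (List Int)) (i : Int) : List (List Bool) :=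
  let d := (PySem.List.pyRange 0 (g.length : Int) 1).foldl
      (fun acc j => acc ++ [PySem.List.pyGetD (PySem.List.pyGetD g j []) i 0]) []
  (PySem.List.pyRange 0 (d.length : Int) 1).foldl
      (fun res j => res ++ [d.map (fun m => decide (PySem.List.pyGetD (PySem.List.pyGetD g j []) i 0 = m))]) []

-- ===== PORT B =====
def samecolumn_alt (g : List (List Int)) (i : Int) : List (List Bool) :=
  let d := g.map (fun row => PySem.List.pyGetD row i 0)
  let cache := d.foldl
      (fun c v => if c.contains v then c else c.insert v (d.map (fun m => decide (v = m)))) PySem.Dict.empty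
  d.map (fun v => cache.getD v [])

-- ===== PRECONDITION & SPEC =====
-- Pre_ excludes exactly the inputs where Python A raises IndexError: i out of Python range for some row.
def Pre_samecolumn (g : List (List Int)) (i : Int) : Prop :=
  ∀ row ∈ g, PySem.Raise.InRange row.length i
instance (g : List (List Int)) (i : Int) : Decidable (Pre_samecolumn g i) := by
  unfold Pre_samecolumn; infer_instance
def pvWitness_samecolumn : List (List Int) × Int := ([[1, 2], [3, 2], [1, 5]], 1)

def Spec_samecolumn (g : List (List Int)) (i : Int) (out : List (List Bool)) : Prop := out = samecolumn_alt g i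
instance (g : List (List Int)) (i : Int) (out : List (List Bool)) : Decidable (Spec_samecolumn g i out) := by unfold Spec_samecolumn; infer_instance

-- ===== CLAIM (what is proved, stated in full; the proofs are below) =====
def Claim_equal_samecolumn : Prop := ∀ (g : List (List Int)) (i : Int), Dom_samecolumn g i → Pre_samecolumn g i → Spec_samecolumn g i (samecolumn g i)

-- ===== LEMMAS AND PROOFS =====

-- The memoizing fold: every value of the list gets looked up to its memoized row f v.
theorem cache_getD (f : Int → List Bool) :
    ∀ (l : List Int) (c : PySem.Dict Int (List Bool)),
      (∀ k, c.contains k = true → c.getD k [] = f k) →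
      ∀ v, (v ∈ l ∨ c.contains v = true) →
        (l.foldl (fun c v => if c.contains v then c else c.insert v (f v)) c).getD v [] = f v := by
  intro l
  induction l with
  | nil =>
    intro c hc v hv
    simp only [List.foldl_nil]
    exact hc v (by simpa using hv)
  | cons x l ih =>
    intro c hc v hv
    simp only [List.foldl_cons]
    by_cases hx : c.contains x = true
    · simp only [hx, if_true]
      apply ih c hc
      rcases hv with h | h
      · rcases List.mem_cons.mp h with rfl | h
        · exact Or.inr hx
        · exact Or.inl h
      · exact Or.inr h
    · rw [if_neg hx]
      apply ih
      · intro k hk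
        rw [PySem.Dict.getD_insert]
        split_ifs with hkx
        · rw [hkx]
        · apply hc
          rw [PySem.Dict.contains_insert] at hk
          simpa [hkx] using hk
      · rcases hv with h | h
        · rcases List.mem_cons.mp h with rfl | h
          · exact Or.inr (by simp)
          · exact Or.inl h
        · exact Or.inr (by simp [PySem.Dict.contains_insert, h])

theorem samecolumn_alt_eq (g : List (List Int)) (i : Int) :
    samecolumn_alt g i
      = (g.map (fun row => PySem.List.pyGetD row i 0)).map
          (fun v => (g.map (fun row => PySem.List.pyGetD row i 0)).map (fun m => decide (v = m))) := by
  unfold samecolumn_alt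
  set d := g.map (fun row => PySem.List.pyGetD row i 0) with hd
  apply List.map_congr_left
  intro v hv
  exact cache_getD (fun v => d.map (fun m => decide (v = m))) d PySem.Dict.empty
    (by intro k hk; simp [PySem.Dict.contains_empty] at hk) v (Or.inl hv)

theorem samecolumn_eq (g : List (List Int)) (i : Int) :
    samecolumn g i
      = (g.map (fun row => PySem.List.pyGetD row i 0)).map
          (fun v => (g.map (fun row => PySem.List.pyGetD row i 0)).map (fun m => decide (v = m))) := by
  simp only [samecolumn]
  have h1 : List.foldl (fun acc j => acc ++ [PySem.List.pyGetD (PySem.List.pyGetD g j []) i 0]) []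
      (PySem.List.pyRange 0 (g.length : Int) 1) = g.map (fun row => PySem.List.pyGetD row i 0) := by
    rw [PySem.List.foldl_pyRange_zero_pyGetD' g ([] : List Int)
         (fun acc row => acc ++ [PySem.List.pyGetD row i 0]) []]
    rw [PySem.List.foldl_append_singleton_eq_map]
    simp
  rw [h1]
  have h2 : (((g.map (fun row => PySem.List.pyGetD row i 0)).length : Nat) : Int) = (g.length : Int) := by
    simp
  rw [h2]
  rw [PySem.List.foldl_pyRange_zero_pyGetD' g ([] : List Int)
       (fun res row => res ++ [(g.map (fun r => PySem.List.pyGetD r i 0)).map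
          (fun m => decide (PySem.List.pyGetD row i 0 = m))]) []]
  rw [PySem.List.foldl_append_singleton_eq_map]
  simp [List.map_map, Function.comp]

-- ===== VERDICT (by name: the statement is the Claim_ definition above) =====
theorem samecolumn_spec : Claim_equal_samecolumn := by
  intro g i _ _
  unfold Spec_samecolumn
  rw [samecolumn_eq, samecolumn_alt_eq]
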